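-- pv_equiv track=rewrite | github.com/wilmurillo-ai/Design-Assistant | .skills/openclaw-skills/skills/redisread/blog-push/scripts/publish_blog.py | extract_content_without_frontmatter
-- ===== SOURCE A (Python) =====
-- def extract_content_without_frontmatter(content: str) -> str:
--     """提取内容，去除原有的 front matter"""
--     lines = content.split("\n")
--     content_lines = []
--     in_frontmatter = False
--     frontmatter_started = False
--
--     for line in lines:
--         if line.strip() == "---":
--             if not frontmatter_started:
--                 frontmatter_started = True
--                 in_frontmatter = True
--                 continue
--             elif in_frontmatter:
--                 in_frontmatter = False
--                 continue
--             else: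
--                 content_lines.append(line)
--                 continue
--
--         if not in_frontmatter:
--             content_lines.append(line)
--
--     return "\n".join(content_lines)
-- ===== SOURCE B (Python) =====
-- def extract_content_without_frontmatter(content: str) -> str:
--     """Index-then-slice: find the '---' marker lines once, then slice them out."""
--     lines = content.split("\n")
--     idx = [i for i, line in enumerate(lines) if line.strip() == "---"]
--     if not idx:
--         return "\n".join(lines)
--     if len(idx) == 1:
--         return "\n".join(lines[:idx[0]])
--     return "\n".join(lines[:idx[0]] + lines[idx[1] + 1:])
-- ===== Notes on version B (the rewrite author's own statement) =====
-- stated objective: simpler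
-- what changed: Replaces the stateful per-line boolean tracking (in_frontmatter/frontmatter_started flags) with a single index pass that locates the delimiter lines, followed by list slicing around the first two of them.
import Mathlib
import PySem

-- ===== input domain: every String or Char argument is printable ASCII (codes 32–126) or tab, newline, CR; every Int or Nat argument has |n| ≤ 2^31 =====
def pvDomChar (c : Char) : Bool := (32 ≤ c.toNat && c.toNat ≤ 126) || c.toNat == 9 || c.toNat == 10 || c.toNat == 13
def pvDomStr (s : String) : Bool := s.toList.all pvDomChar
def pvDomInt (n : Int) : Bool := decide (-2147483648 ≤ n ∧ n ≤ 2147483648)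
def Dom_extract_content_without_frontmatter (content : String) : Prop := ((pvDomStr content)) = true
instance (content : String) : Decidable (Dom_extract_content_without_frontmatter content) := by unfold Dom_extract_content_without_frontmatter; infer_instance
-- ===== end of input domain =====

-- B strips the front matter by finding the '---' marker indices once and slicing,
-- instead of A's per-line boolean state machine (objective: simpler).

-- ===== PORT A =====
-- state = (content_lines, in_frontmatter, frontmatter_started)
def pvStepA (st : List String × Bool × Bool) (line : String) : List String × Bool × Bool :=
  let cls := st.1
  let in_fm := st.2.1
  let fm_started := st.2.2
  if PySem.Str.strip line == "---" then
    if !fm_started then (cls, true, true)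
    else if in_fm then (cls, false, true)
    else (cls ++ [line], in_fm, fm_started)
  else if !in_fm then (cls ++ [line], in_fm, fm_started)
  else (cls, in_fm, fm_started)

-- content.split("\n"): split? is some here since the separator is nonempty
def extract_content_without_frontmatter (content : String) : String :=
  let lines := (PySem.Str.split? content "\n").getD []
  let res := lines.foldl pvStepA ([], false, false)
  PySem.Str.join "\n" res.1

-- ===== PORT B =====
-- the index comprehension: [i for i, line in enumerate(lines) if line.strip() == "---"]
def pvMarkerIdx (i : Nat) : List String → List Nat
  | [] => []
  | l :: rest =>
      if PySem.Str.strip l == "---" then i :: pvMarkerIdx (i + 1) rest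
      else pvMarkerIdx (i + 1) rest

def extract_content_without_frontmatter_alt (content : String) : String :=
  let lines := (PySem.Str.split? content "\n").getD []
  match pvMarkerIdx 0 lines with
  | [] => PySem.Str.join "\n" lines
  | [f] => PySem.Str.join "\n" (lines.take f)
  | f :: s :: _ => PySem.Str.join "\n" (lines.take f ++ lines.drop (s + 1))

-- ===== PRECONDITION & SPEC =====
def Spec_extract_content_without_frontmatter (content : String) (out : String) : Prop := out = extract_content_without_frontmatter_alt content
instance (content : String) (out : String) : Decidable (Spec_extract_content_without_frontmatter content out) := by unfold Spec_extract_content_without_frontmatter; infer_instance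

-- ===== CLAIM (what is proved, stated in full; the proofs are below) =====
def Claim_equal_extract_content_without_frontmatter : Prop := ∀ (content : String), Dom_extract_content_without_frontmatter content → Spec_extract_content_without_frontmatter content (extract_content_without_frontmatter content)

-- ===== LEMMAS AND PROOFS =====

-- shifting the start index of the comprehension
theorem pvMarkerIdx_succ (ls : List String) (i : Nat) :
    pvMarkerIdx (i + 1) ls = (pvMarkerIdx i ls).map (· + 1) := by
  induction ls generalizing i with
  | nil => simp [pvMarkerIdx]
  | cons l rest ih =>
      by_cases h : PySem.Str.strip l == "---" <;> simp [pvMarkerIdx, h, ih]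

-- after the closing marker A copies every line verbatim
theorem pvFold_phase2 (ls : List String) (acc : List String) :
    ls.foldl pvStepA (acc, false, true) = (acc ++ ls, false, true) := by
  induction ls generalizing acc with
  | nil => simp
  | cons l rest ih =>
      simp only [List.foldl_cons, pvStepA]
      by_cases h : PySem.Str.strip l == "---" <;> simp [h, ih]

-- inside the front matter A skips until the next marker line
theorem pvFold_phase1 (ls : List String) (acc : List String) :
    (ls.foldl pvStepA (acc, true, true)).1 =
      (match pvMarkerIdx 0 ls with
       | [] => acc
       | s :: _ => acc ++ ls.drop (s + 1)) := by
  induction ls generalizing acc with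
  | nil => simp [pvMarkerIdx]
  | cons l rest ih =>
      simp only [List.foldl_cons, pvStepA, pvMarkerIdx]
      by_cases h : PySem.Str.strip l == "---"
      · simp [h, pvFold_phase2]
      · simp only [h, Bool.false_eq_true, if_false, Bool.not_true]
        rw [ih, pvMarkerIdx_succ]
        cases pvMarkerIdx 0 rest with
        | nil => simp
        | cons s t => simp

-- before any marker A copies lines; the whole loop equals B's slicing
theorem pvFold_phase0 (ls : List String) (acc : List String) :
    (ls.foldl pvStepA (acc, false, false)).1 =
      (match pvMarkerIdx 0 ls with
       | [] => acc ++ ls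
       | [f] => acc ++ ls.take f
       | f :: s :: _ => acc ++ ls.take f ++ ls.drop (s + 1)) := by
  induction ls generalizing acc with
  | nil => simp [pvMarkerIdx]
  | cons l rest ih =>
      simp only [List.foldl_cons, pvStepA, pvMarkerIdx]
      by_cases h : PySem.Str.strip l == "---"
      · simp only [h, Bool.not_false, if_pos]
        rw [pvFold_phase1, pvMarkerIdx_succ]
        cases pvMarkerIdx 0 rest with
        | nil => simp
        | cons s t => simp
      · simp only [h, Bool.false_eq_true, if_false, Bool.not_false, if_true]
        rw [ih, pvMarkerIdx_succ]
        cases pvMarkerIdx 0 rest with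
        | nil => simp
        | cons f t => cases t <;> simp

-- ===== VERDICT (by name: the statement is the Claim_ definition above) =====
theorem extract_content_without_frontmatter_spec : Claim_equal_extract_content_without_frontmatter := by
  intro content _
  show PySem.Str.join "\n" ((((PySem.Str.split? content "\n").getD []).foldl pvStepA ([], false, false)).1) =
    extract_content_without_frontmatter_alt content
  have halt : extract_content_without_frontmatter_alt content =
      (match pvMarkerIdx 0 ((PySem.Str.split? content "\n").getD []) with
       | [] => PySem.Str.join "\n" ((PySem.Str.split? content "\n").getD [])
       | [f] => PySem.Str.join "\n" (((PySem.Str.split? content "\n").getD []).take f)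
       | f :: s :: _ => PySem.Str.join "\n" (((PySem.Str.split? content "\n").getD []).take f ++ ((PySem.Str.split? content "\n").getD []).drop (s + 1))) := rfl
  rw [halt, pvFold_phase0]
  cases pvMarkerIdx 0 ((PySem.Str.split? content "\n").getD []) with
  | nil => simp
  | cons f t => cases t <;> simp
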